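-- pv_equiv track=rewrite | github.com/cattykitty4/str_counters | str_counters/counting_occurrences/code.py | counting_index
-- ===== SOURCE A (Python) =====
-- def counting_index(input_line: str) -> list:
--     user = input_line.split()
--     lst = [-1] * len(user)
--     dct = {}
--
--     for i, el in enumerate(user):
--         if el not in dct:
--             dct[el] = i
--         else:
--             lst[i] = dct[el]
--             dct[el] = i
--     return lst
-- ===== SOURCE B (Python) =====
-- def counting_index(input_line: str) -> list:
--     words = input_line.split()
--     out = []
--     for i, w in enumerate(words):
--         p = -1
--         for j in range(i - 1, -1, -1):
--             if words[j] == w: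
--                 p = j
--                 break
--         out.append(p)
--     return out
-- ===== Notes on version B (the rewrite author's own statement) =====
-- stated objective: alternative
-- what changed: B drops the last-seen-index dict entirely: for each position it scans backwards through the word list for the nearest earlier equal word, collecting results with append instead of pre-allocating and mutating a [-1]*n list.
import Mathlib
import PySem

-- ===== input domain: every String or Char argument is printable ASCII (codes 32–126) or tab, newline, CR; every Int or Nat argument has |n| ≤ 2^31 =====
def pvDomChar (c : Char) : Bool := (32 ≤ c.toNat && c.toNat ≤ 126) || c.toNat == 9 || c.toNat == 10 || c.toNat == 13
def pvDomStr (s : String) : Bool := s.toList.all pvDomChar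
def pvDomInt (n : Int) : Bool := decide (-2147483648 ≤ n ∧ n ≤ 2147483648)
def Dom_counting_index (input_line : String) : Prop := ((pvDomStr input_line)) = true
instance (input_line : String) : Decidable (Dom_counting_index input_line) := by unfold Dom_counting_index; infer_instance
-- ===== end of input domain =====

-- B replaces A's one-pass last-seen-index dict with a dict-free backward scan per position (alternative decomposition, not claimed faster).

-- ===== PORT A =====
-- A's loop state: (lst, dct); 'el not in dct' is tested via dct.get? el = none.
def pvStepA (st : List Int × PySem.Dict String Int) (p : Int × String) : List Int × PySem.Dict String Int :=
  match st.2.get? p.2 with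
  | none => (st.1, st.2.insert p.2 p.1)
  | some v => (st.1.set p.1.toNat v, st.2.insert p.2 p.1)

def counting_index (input_line : String) : List Int :=
  let user := PySem.Str.split₀ input_line
  let init : List Int := List.replicate user.length (-1)
  ((PySem.List.enumerate user 0).foldl pvStepA (init, PySem.Dict.empty)).1

-- ===== PORT B =====
-- inner loop of B: for j in range(i-1, -1, -1): if words[j] == w: p = j; break   (p starts at -1)
def pvBackScan (ws : List String) (w : String) : Nat → Int
  | 0 => -1
  | j+1 => if ws.getD j "" = w then (j : Int) else pvBackScan ws w j

def counting_index_alt (input_line : String) : List Int :=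
  let words := PySem.Str.split₀ input_line
  (PySem.List.enumerate words 0).map (fun p => pvBackScan words p.2 p.1.toNat)

-- ===== PRECONDITION & SPEC =====
def Spec_counting_index (input_line : String) (out : List Int) : Prop := out = counting_index_alt input_line
instance (input_line : String) (out : List Int) : Decidable (Spec_counting_index input_line out) := by unfold Spec_counting_index; infer_instance

-- ===== CLAIM (what is proved, stated in full; the proofs are below) =====
def Claim_equal_counting_index : Prop := ∀ (input_line : String), Dom_counting_index input_line → Spec_counting_index input_line (counting_index input_line)

-- ===== LEMMAS AND PROOFS =====

-- the dict value A maintains for word w after processing the first k words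
def pvDval (W : List String) (w : String) (k : Nat) : Option Int :=
  if pvBackScan W w k = -1 then none else some (pvBackScan W w k)

theorem pvBackScan_succ_self (W : List String) (k : Nat) (hk : k < W.length) :
    pvBackScan W W[k] (k+1) = (k : Int) := by
  simp only [pvBackScan]
  rw [if_pos (List.getD_eq_getElem W "" hk)]

theorem pvBackScan_succ_ne (W : List String) (w : String) (k : Nat) (hk : k < W.length)
    (hne : w ≠ W[k]) : pvBackScan W w (k+1) = pvBackScan W w k := by
  simp only [pvBackScan]
  rw [if_neg]
  rw [List.getD_eq_getElem W "" hk]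
  exact fun h => hne h.symm

-- invariant for A's fold, by induction on the length of the remaining suffix
theorem pvA_inv (W : List String) : ∀ (m k : Nat), m = W.length - k → k ≤ W.length →
    ∀ (lst : List Int) (d : PySem.Dict String Int),
    lst = (List.range W.length).map (fun i => if i < k then pvBackScan W (W.getD i "") i else -1) →
    (∀ w, d.get? w = pvDval W w k) →
    ((PySem.List.enumerate (W.drop k) (k : Int)).foldl pvStepA (lst, d)).1 =
      (List.range W.length).map (fun i => pvBackScan W (W.getD i "") i) := by
  intro m
  induction m with
  | zero =>
    intro k hm hk lst d hlst hd
    have hkn : k = W.length := by omega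
    subst hkn
    rw [List.drop_length, PySem.List.enumerate_nil, List.foldl_nil, hlst]
    exact List.map_congr_left (fun i hi => by rw [if_pos (List.mem_range.mp hi)])
  | succ m ih =>
    intro k hm hk lst d hlst hd
    have hklt : k < W.length := by omega
    have hdrop : W.drop k = W[k] :: W.drop (k+1) := List.drop_eq_getElem_cons hklt
    rw [hdrop, PySem.List.enumerate_cons, List.foldl_cons]
    have hcast : ((k : Int) + 1) = ((k + 1 : Nat) : Int) := by push_cast; ring
    rw [hcast]
    have hgetDk : W.getD k "" = W[k] := List.getD_eq_getElem W "" hklt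
    have hd_el : d.get? W[k] = pvDval W W[k] k := hd W[k]
    -- the dict component is the same in both cases
    have hdict : ∀ (d' : PySem.Dict String Int), d' = d.insert W[k] (k : Int) →
        ∀ w, d'.get? w = pvDval W w (k+1) := by
      intro d' hd' w
      subst hd'
      by_cases hw : w = W[k]
      · subst hw
        rw [PySem.Dict.get?_insert_self, pvDval, pvBackScan_succ_self W k hklt]
        rw [if_neg (by omega)]
      · rw [PySem.Dict.get?_insert_of_ne _ _ hw, hd w, pvDval, pvDval,
            pvBackScan_succ_ne W w k hklt hw]
    by_cases hcase : pvBackScan W W[k] k = -1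
    · -- no previous occurrence: lst unchanged, lst[k] stays -1
      have hget : d.get? W[k] = none := by rw [hd_el, pvDval, if_pos hcase]
      have hstep : pvStepA (lst, d) ((k : Int), W[k]) = (lst, d.insert W[k] (k : Int)) := by
        simp [pvStepA, hget]
      rw [hstep]
      refine ih (k+1) (by omega) (by omega) lst _ ?_ (hdict _ rfl)
      rw [hlst]
      refine List.map_congr_left (fun i hi => ?_)
      by_cases hik : i < k
      · rw [if_pos hik, if_pos (by omega)]
      · by_cases hik' : i = k
        · subst hik'
          rw [if_neg hik, if_pos (by omega), hgetDk, hcase]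
        · rw [if_neg hik, if_neg (by omega)]
    · -- previous occurrence exists: lst[k] := dct[W[k]]
      have hget : d.get? W[k] = some (pvBackScan W W[k] k) := by
        rw [hd_el, pvDval, if_neg hcase]
      have hstep : pvStepA (lst, d) ((k : Int), W[k]) =
          (lst.set k (pvBackScan W W[k] k), d.insert W[k] (k : Int)) := by
        simp [pvStepA, hget]
      rw [hstep]
      refine ih (k+1) (by omega) (by omega) _ _ ?_ (hdict _ rfl)
      rw [hlst]
      refine List.ext_getElem (by simp) (fun i h1 h2 => ?_)
      have hin : i < W.length := by simpa using h2
      rw [List.getElem_set, List.getElem_map, List.getElem_map]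
      by_cases hik' : k = i
      · subst hik'
        rw [if_pos rfl, List.getElem_range, if_pos (by omega), hgetDk]
      · rw [if_neg hik']
        simp only [List.getElem_range]
        by_cases hik : i < k
        · rw [if_pos hik, if_pos (by omega)]
        · rw [if_neg hik, if_neg (by omega)]

-- B's map over enumerate, characterized over the same suffix
theorem pvB_inv (W : List String) : ∀ (m k : Nat), m = W.length - k → k ≤ W.length →
    (PySem.List.enumerate (W.drop k) (k : Int)).map (fun p => pvBackScan W p.2 p.1.toNat) =
      (List.range' k m).map (fun i => pvBackScan W (W.getD i "") i) := by
  intro m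
  induction m with
  | zero =>
    intro k hm hk
    have hkn : k = W.length := by omega
    subst hkn
    rw [List.drop_length, PySem.List.enumerate_nil]
    rfl
  | succ m ih =>
    intro k hm hk
    have hklt : k < W.length := by omega
    have hdrop : W.drop k = W[k] :: W.drop (k+1) := List.drop_eq_getElem_cons hklt
    rw [hdrop, PySem.List.enumerate_cons, List.map_cons, List.range'_succ, List.map_cons]
    have hcast : ((k : Int) + 1) = ((k + 1 : Nat) : Int) := by push_cast; ring
    rw [hcast, ih (k+1) (by omega) (by omega)]
    simp [List.getElem?_eq_getElem hklt]

-- ===== VERDICT (by name: the statement is the Claim_ definition above) =====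
theorem counting_index_spec : Claim_equal_counting_index := by
  intro s _
  unfold Spec_counting_index counting_index counting_index_alt
  have hA := pvA_inv (PySem.Str.split₀ s) ((PySem.Str.split₀ s).length - 0) 0 rfl
    (Nat.zero_le _) (List.replicate (PySem.Str.split₀ s).length (-1)) PySem.Dict.empty
    (by rw [show (fun i => if i < 0 then pvBackScan (PySem.Str.split₀ s) ((PySem.Str.split₀ s).getD i "") i else -1) = (fun _ : Nat => (-1 : Int)) from funext (fun i => by rw [if_neg (Nat.not_lt_zero i)])]
        rw [List.map_const']; simp)
    (fun w => by rw [PySem.Dict.get?_empty]; simp [pvDval, pvBackScan])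
  have hB := pvB_inv (PySem.Str.split₀ s) ((PySem.Str.split₀ s).length - 0) 0 rfl (Nat.zero_le _)
  simp only [List.drop_zero, Nat.sub_zero, Int.natCast_zero] at hA hB
  rw [hA, hB, ← List.range_eq_range']
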